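-- pv_equiv track=rewrite | github.com/raeez/chiral-bar-cobar-vol2 | compute/lib/fm_boundary.py | boundary_strata
-- ===== SOURCE A (Python) =====
-- from itertools import combinations
--
-- def boundary_strata(k):
--     """Return all codimension-1 boundary strata of FM_k(C).
--
--     Each stratum is specified by a subset S ⊂ {1,...,k} with |S| ≥ 2.
--     The stratum D_S corresponds to the points labeled by S colliding.
--
--     Returns:
--         List of frozensets, each a subset S of {1,...,k} with |S| ≥ 2.
--     """
--     if k < 2:
--         return []
--     strata = []
--     for size in range(2, k + 1):
--         for subset in combinations(range(1, k + 1), size):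
--             strata.append(frozenset(subset))
--     return strata
-- ===== SOURCE B (Python) =====
-- def boundary_strata(k):
--     """Return all codimension-1 boundary strata of FM_k(C).
--
--     Same output as A: for each size 2..k, all size-subsets of {1..k}
--     in lexicographic order, each as a frozenset.
--     """
--     if k < 2:
--         return []
--     strata = []
--
--     def rec(start, remaining, prefix):
--         if remaining == 0:
--             strata.append(frozenset(prefix))
--             return
--         for x in range(start, k + 1):
--             rec(x + 1, remaining - 1, prefix + [x])
--
--     for size in range(2, k + 1):
--         rec(1, size, [])
--     return strata
-- ===== Notes on version B (the rewrite author's own statement) =====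
-- stated objective: alternative
-- what changed: Replaces the itertools.combinations library call with a hand-written depth-first recursion over (start, remaining, prefix) that emits each subset when the remaining count reaches zero, producing the same lexicographic, size-ascending order.
import Mathlib
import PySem

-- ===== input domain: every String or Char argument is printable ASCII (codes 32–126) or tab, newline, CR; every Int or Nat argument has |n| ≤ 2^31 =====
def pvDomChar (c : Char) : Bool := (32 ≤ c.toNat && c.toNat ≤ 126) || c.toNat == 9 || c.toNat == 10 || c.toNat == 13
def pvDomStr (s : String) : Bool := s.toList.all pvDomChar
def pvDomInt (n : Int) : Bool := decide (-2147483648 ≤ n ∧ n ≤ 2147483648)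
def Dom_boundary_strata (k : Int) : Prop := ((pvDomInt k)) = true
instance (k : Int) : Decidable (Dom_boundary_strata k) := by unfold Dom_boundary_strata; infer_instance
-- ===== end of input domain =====

-- B replaces the itertools.combinations call in A with a hand-written
-- depth-first recursion over (start, remaining, pfx); same output ('alternative').

-- ===== PORT A =====
-- itertools.combinations(xs, r) in lexicographic order (exact for a duplicate-free
-- increasing xs such as range(1, k+1), which is the only use here)
def pvComb : List Int → Nat → List (List Int)
  | _, 0 => [[]]
  | [], _ + 1 => []
  | x :: xs, r + 1 => (pvComb xs r).map (fun c => x :: c) ++ pvComb xs (r + 1)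

def boundary_strata (k : Int) : List (List Int) :=
  if k < 2 then []
  else
    (PySem.List.pyRange 2 (k + 1) 1).foldl
      (fun strata size =>
        (pvComb (PySem.List.pyRange 1 (k + 1) 1) size.toNat).foldl
          (fun acc subset => acc ++ [PySem.Set.ofList subset]) strata)
      []

-- ===== PORT B =====
-- rec(start, remaining, pfx) from Source B: emits frozenset(pfx) when remaining = 0,
-- otherwise loops x over range(start, k+1) and recurses with pfx + [x]
def pvAltRec (k : Int) : Nat → Int → List Int → List (List Int)
  | 0, _, pfx => [PySem.Set.ofList pfx]
  | r + 1, start, pfx =>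
    (PySem.List.pyRange start (k + 1) 1).foldl
      (fun acc x => acc ++ pvAltRec k r (x + 1) (pfx ++ [x])) []

def boundary_strata_alt (k : Int) : List (List Int) :=
  if k < 2 then []
  else
    (PySem.List.pyRange 2 (k + 1) 1).foldl
      (fun strata size => strata ++ pvAltRec k size.toNat 1 []) []

-- ===== PRECONDITION & SPEC =====
def Spec_boundary_strata (k : Int) (out : List (List Int)) : Prop := out = boundary_strata_alt k
instance (k : Int) (out : List (List Int)) : Decidable (Spec_boundary_strata k out) := by unfold Spec_boundary_strata; infer_instance

-- ===== CLAIM (what is proved, stated in full; the proofs are below) =====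
def Claim_equal_boundary_strata : Prop := ∀ (k : Int), Dom_boundary_strata k → Spec_boundary_strata k (boundary_strata k)

-- ===== LEMMAS AND PROOFS =====

-- pvComb over an integer range unrolled by choice of the first (smallest) element
theorem pvComb_pyRange (r : Nat) (b : Int) : ∀ (a : Int),
    pvComb (PySem.List.pyRange a b 1) (r + 1) =
      (PySem.List.pyRange a b 1).flatMap
        (fun x => (pvComb (PySem.List.pyRange (x + 1) b 1) r).map (fun c => x :: c)) := by
  intro a
  by_cases hab : a < b
  · have ih := pvComb_pyRange r b (a + 1)
    rw [PySem.List.pyRange_one_cons hab]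
    simp only [pvComb, List.flatMap_cons, ih]
  · rw [PySem.List.pyRange_one_eq_nil (by omega : b ≤ a)]
    simp [pvComb]
termination_by a => (b - a).toNat
decreasing_by omega

theorem pvAltRec_eq (k : Int) (r : Nat) : ∀ (start : Int) (pfx : List Int),
    pvAltRec k r start pfx =
      (pvComb (PySem.List.pyRange start (k + 1) 1) r).map
        (fun c => PySem.Set.ofList (pfx ++ c)) := by
  induction r with
  | zero => intro start pfx; simp [pvAltRec, pvComb]
  | succ r ih =>
    intro start pfx
    rw [pvAltRec, PySem.List.foldl_append_eq_flatMap, pvComb_pyRange]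
    simp [List.map_flatMap, List.map_map, ih, Function.comp_def]

-- ===== VERDICT (by name: the statement is the Claim_ definition above) =====
theorem boundary_strata_spec : Claim_equal_boundary_strata := by
  intro k _
  unfold Spec_boundary_strata boundary_strata boundary_strata_alt
  by_cases hk : k < 2
  · simp [hk]
  · simp only [hk, if_false]
    congr 1
    funext acc size
    rw [PySem.List.foldl_append_singleton_eq_map, pvAltRec_eq]
    simp
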